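-- pv_equiv track=rewrite | github.com/epdtry/gw2-scripts | snapshot_diff.py | diff_wallet
-- ===== SOURCE A (Python) =====
-- def diff_wallet(wallet1, wallet2):
--     wallet_diff = dict()
--
--     wallet1_dict = dict((currency['id'], currency['value']) for currency in wallet1)
--     wallet2_dict = dict((currency['id'], currency['value']) for currency in wallet2)
--
--     wallet1_keys = wallet1_dict.keys()
--     wallet2_keys = wallet2_dict.keys()
--     all_keys = set().union(*[wallet1_keys, wallet2_keys])
--
--     for currencyId in all_keys:
--         wallet1_value = wallet1_dict.get(currencyId, 0)
--         wallet2_value = wallet2_dict.get(currencyId, 0)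
--         diff_value = wallet2_value - wallet1_value
--         if diff_value == 0:
--             continue
--         wallet_diff[currencyId] = diff_value
--
--     return wallet_diff
-- ===== SOURCE B (Python) =====
-- def diff_wallet(wallet1, wallet2):
--     # One flat "latest value per (sign, id)" dict over both wallets, then a single
--     # signed accumulation pass, then keep the nonzero totals.
--     latest = {}
--     for sign, wallet in ((-1, wallet1), (1, wallet2)):
--         for c in wallet:
--             latest[sign, c['id']] = c['value']
--     net = {}
--     for (sign, cid), val in latest.items():
--         net[cid] = net.get(cid, 0) + sign * val
--     return {k: v for k, v in net.items() if v != 0}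
-- ===== Notes on version B (the rewrite author's own statement) =====
-- stated objective: alternative
-- what changed: A builds one dict per wallet, unions their key sets and loops over the union doing two lookups per key; B never forms per-wallet dicts or a key union: it flattens both wallets into a single last-value-wins dict keyed by (sign, id), folds that dict once with signed accumulation into the net totals, and keeps the nonzero entries.
import Mathlib
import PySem

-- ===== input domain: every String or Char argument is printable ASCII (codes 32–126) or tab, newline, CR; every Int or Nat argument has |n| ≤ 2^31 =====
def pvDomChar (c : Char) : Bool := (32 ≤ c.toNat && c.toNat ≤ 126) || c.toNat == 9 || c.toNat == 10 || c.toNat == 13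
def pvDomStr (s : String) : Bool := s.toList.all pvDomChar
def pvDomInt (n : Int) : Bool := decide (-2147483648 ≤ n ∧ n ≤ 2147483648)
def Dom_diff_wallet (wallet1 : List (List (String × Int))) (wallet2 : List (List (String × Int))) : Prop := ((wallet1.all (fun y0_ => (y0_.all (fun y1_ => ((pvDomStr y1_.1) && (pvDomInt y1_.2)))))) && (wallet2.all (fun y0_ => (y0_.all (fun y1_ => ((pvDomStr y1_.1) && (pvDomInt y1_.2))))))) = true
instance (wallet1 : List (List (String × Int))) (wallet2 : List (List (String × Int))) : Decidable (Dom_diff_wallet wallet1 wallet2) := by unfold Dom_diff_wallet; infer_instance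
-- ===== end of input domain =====

-- B replaces A's two per-wallet dicts + key-set union + per-key double lookup by one flat
-- last-value-wins dict keyed by (sign, id) over both wallets, a single signed-accumulation
-- pass over its items, and a nonzero filter; objective: alternative decomposition.
-- Equality proved is about the returned dict (as its item list).

-- currency['id'] / currency['value']: a Python dict lookup (first match in the association
-- list); total form with default 0, used only under Pre_ which guarantees the key is present.
def pvField (c : List (String × Int)) (k : String) : Int :=
  (PySem.Dict.mk c).getD k 0

-- ===== PORT A =====
def diff_wallet (wallet1 : List (List (String × Int))) (wallet2 : List (List (String × Int))) : List (Int × Int) :=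
  let wallet1_dict : PySem.Dict Int Int :=
    PySem.Dict.ofList (wallet1.map (fun currency => (pvField currency "id", pvField currency "value")))
  let wallet2_dict : PySem.Dict Int Int :=
    PySem.Dict.ofList (wallet2.map (fun currency => (pvField currency "id", pvField currency "value")))
  let wallet1_keys := wallet1_dict.keys
  let wallet2_keys := wallet2_dict.keys
  let all_keys : PySem.Set Int := PySem.Set.union (PySem.Set.union PySem.Set.empty wallet1_keys) wallet2_keys
  let wallet_diff : PySem.Dict Int Int :=
    all_keys.foldl (fun wallet_diff currencyId =>
      let wallet1_value := wallet1_dict.getD currencyId 0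
      let wallet2_value := wallet2_dict.getD currencyId 0
      let diff_value := wallet2_value - wallet1_value
      if diff_value = 0 then wallet_diff
      else wallet_diff.insert currencyId diff_value) PySem.Dict.empty
  wallet_diff.items

-- ===== PORT B =====
def diff_wallet_alt (wallet1 : List (List (String × Int))) (wallet2 : List (List (String × Int))) : List (Int × Int) :=
  let latest : PySem.Dict (Int × Int) Int :=
    [((-1 : Int), wallet1), ((1 : Int), wallet2)].foldl
      (fun latest sw =>
        sw.2.foldl (fun latest c => latest.insert (sw.1, pvField c "id") (pvField c "value")) latest)
      PySem.Dict.empty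
  let net : PySem.Dict Int Int :=
    latest.items.foldl (fun net p => net.insert p.1.2 (net.getD p.1.2 0 + p.1.1 * p.2)) PySem.Dict.empty
  (PySem.Dict.ofList (net.items.filter (fun p => p.2 != 0))).items

-- ===== PRECONDITION & SPEC =====
-- Pre_ excludes exactly the inputs where Python A raises KeyError: a currency record
-- missing the 'id' or 'value' key.
def Pre_diff_wallet (wallet1 : List (List (String × Int))) (wallet2 : List (List (String × Int))) : Prop :=
  (∀ c ∈ wallet1, "id" ∈ c.map Prod.fst ∧ "value" ∈ c.map Prod.fst) ∧
  (∀ c ∈ wallet2, "id" ∈ c.map Prod.fst ∧ "value" ∈ c.map Prod.fst)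
instance (wallet1 : List (List (String × Int))) (wallet2 : List (List (String × Int))) : Decidable (Pre_diff_wallet wallet1 wallet2) := by unfold Pre_diff_wallet; infer_instance

def pvWitness_diff_wallet : (List (List (String × Int))) × (List (List (String × Int))) :=
  ([[("id", 1), ("value", 5)]], [[("id", 1), ("value", 7)], [("id", 2), ("value", 3)]])

def Spec_diff_wallet (wallet1 : List (List (String × Int))) (wallet2 : List (List (String × Int))) (out : List (Int × Int)) : Prop := out = diff_wallet_alt wallet1 wallet2
instance (wallet1 : List (List (String × Int))) (wallet2 : List (List (String × Int))) (out : List (Int × Int)) : Decidable (Spec_diff_wallet wallet1 wallet2 out) := by unfold Spec_diff_wallet; infer_instance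

-- ===== CLAIM (what is proved, stated in full; the proofs are below) =====
def Claim_equal_diff_wallet : Prop := ∀ (wallet1 : List (List (String × Int))) (wallet2 : List (List (String × Int))), Dom_diff_wallet wallet1 wallet2 → Pre_diff_wallet wallet1 wallet2 → Spec_diff_wallet wallet1 wallet2 (diff_wallet wallet1 wallet2)

-- ===== LEMMAS AND PROOFS =====

-- shorthands for c['id'] and c['value'] (proof-side only)
def pvK (c : List (String × Int)) : Int := pvField c "id"
def pvV (c : List (String × Int)) : Int := pvField c "value"

-- a fold that only overwrites an accumulator keeps the image of the last element
theorem foldl_const_getLastD {α ν : Type} (h : α → ν) (l : List α) (init : ν) :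
    l.foldl (fun _ c => h c) init = (l.map h).getLastD init := by
  induction l generalizing init with
  | nil => rfl
  | cons c l ih => rw [List.foldl_cons, ih (h c), List.map_cons, List.getLastD_cons]

-- lookup in a keyed insert-fold: the last inserted value for that key wins
theorem getD_foldl_insert_keyfun {α κ ν : Type} [BEq κ] [LawfulBEq κ]
    (key : α → κ) (val : α → ν) (l : List α) (d : PySem.Dict κ ν) (k : κ) (d0 : ν) :
    (l.foldl (fun d c => d.insert (key c) (val c)) d).getD k d0 =
      (l.filter (fun c => key c == k)).foldl (fun _ c => val c) (d.getD k d0) := by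
  induction l generalizing d with
  | nil => rfl
  | cons c l ih =>
    by_cases hk : key c = k
    · subst hk
      simp [ih, PySem.Dict.getD_insert_self]
    · have hb : (key c == k) = false := by simp [hk]
      rw [List.foldl_cons, ih, List.filter_cons]
      simp only [hb, Bool.false_eq_true, if_false]
      rw [PySem.Dict.getD_insert_of_ne _ _ _ (Ne.symm hk)]

-- a conditional-insert fold over distinct fresh keys appends the surviving items in order
theorem items_foldl_insert_if {κ : Type} [BEq κ] [LawfulBEq κ]
    (g : κ → Int) (l : List κ) (d : PySem.Dict κ Int) (hnd : l.Nodup)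
    (hfresh : ∀ k ∈ l, d.contains k = false) :
    (l.foldl (fun d k => if g k = 0 then d else d.insert k (g k)) d).items =
      d.items ++ l.filterMap (fun k => if g k = 0 then none else some (k, g k)) := by
  induction l generalizing d with
  | nil => simp
  | cons k l ih =>
    have hk := hfresh k (by simp)
    rw [List.foldl_cons]
    by_cases h0 : g k = 0
    · rw [if_pos h0, ih _ hnd.of_cons (fun k' hk' => hfresh k' (by simp [hk']))]
      simp [h0]
    · rw [if_neg h0,
        ih _ hnd.of_cons (fun k' hk' => by
          rw [PySem.Dict.contains_insert]
          have hb : (k' == k) = false := by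
            simp; rintro rfl; exact (List.nodup_cons.mp hnd).1 hk'
          simp [hb, hfresh k' (by simp [hk'])]),
        PySem.Dict.items_insert_of_not_contains _ _ hk]
      simp [h0]

-- filtering a pair-comprehension by nonzero second component is a filterMap
theorem filter_map_pair {κ : Type} (g : κ → Int) (l : List κ) :
    (l.map (fun k => (k, g k))).filter (fun p => p.2 != 0) =
      l.filterMap (fun k => if g k = 0 then none else some (k, g k)) := by
  induction l with
  | nil => rfl
  | cons k l ih =>
    by_cases h : g k = 0 <;> simp [h, ih]

-- the value map of dict((c['id'], c['value']) for c in w)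
theorem dict_ofList_getD (w : List (List (String × Int))) (k : Int) :
    (PySem.Dict.ofList (w.map (fun c => (pvField c "id", pvField c "value")))).getD k 0 =
      ((w.filter (fun c => pvK c == k)).map pvV).getLastD 0 := by
  show (List.foldl _ PySem.Dict.empty _).getD k 0 = _
  rw [List.foldl_map]
  rw [getD_foldl_insert_keyfun (fun c => pvField c "id") (fun c => pvField c "value") w
    PySem.Dict.empty k 0]
  rw [foldl_const_getLastD]
  rfl

-- the key list of dict((c['id'], c['value']) for c in w)
theorem dict_ofList_keys (w : List (List (String × Int))) :
    (PySem.Dict.ofList (w.map (fun c => (pvField c "id", pvField c "value")))).keys =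
      PySem.Set.ofList (w.map pvK) := by
  show (List.foldl (fun (acc : PySem.Dict Int Int) (p : Int × Int) => acc.insert p.1 p.2)
      PySem.Dict.empty (w.map (fun c => (pvField c "id", pvField c "value")))).keys = _
  rw [PySem.Dict.keys_foldl_insert_key (w.map (fun c => (pvField c "id", pvField c "value")))
    Prod.fst (fun _ p => p.2) PySem.Dict.empty]
  simp only [List.map_map]
  rfl

-- proof-side abbreviations for the two wallet dicts, their key sets and the diff function
def pvW (w : List (List (String × Int))) : PySem.Dict Int Int :=
  PySem.Dict.ofList (w.map (fun c => (pvField c "id", pvField c "value")))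
def pvKeys (w : List (List (String × Int))) : PySem.Set Int :=
  PySem.Set.ofList (w.map pvK)
def pvG (w1 w2 : List (List (String × Int))) (k : Int) : Int :=
  (pvW w2).getD k 0 - (pvW w1).getD k 0

theorem pvW_keys (w : List (List (String × Int))) : (pvW w).keys = pvKeys w :=
  dict_ofList_keys w

theorem mem_pvKeys_iff (w : List (List (String × Int))) (k : Int) :
    k ∈ pvKeys w ↔ w.filter (fun c => pvK c == k) ≠ [] := by
  simp [pvKeys, PySem.Set.mem_ofList, List.filter_eq_nil_iff, List.mem_map]

theorem pvW_getD (w : List (List (String × Int))) (k : Int) :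
    (pvW w).getD k 0 = ((w.filter (fun c => pvK c == k)).map pvV).getLastD 0 :=
  dict_ofList_getD w k

theorem pvW_getD_of_not_mem (w : List (List (String × Int))) (k : Int)
    (hk : k ∉ pvKeys w) : (pvW w).getD k 0 = 0 := by
  rw [pvW_getD]
  have h0 : w.filter (fun c => pvK c == k) = [] := by
    by_contra h; exact hk ((mem_pvKeys_iff w k).mpr h)
  rw [h0]; rfl

-- first component of the surviving-diff list
theorem map_fst_filterMap_if (g : Int → Int) (l : List Int) :
    (l.filterMap (fun k => if g k = 0 then none else some (k, g k))).map Prod.fst =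
      l.filter (fun k => g k != 0) := by
  induction l with
  | nil => rfl
  | cons k l ih => by_cases h : g k = 0 <;> simp [h, ih]

theorem items_ofList_of_nodup_keys {κ ν : Type} [BEq κ] [LawfulBEq κ]
    (L : List (κ × ν)) (h : (L.map Prod.fst).Nodup) : (PySem.Dict.ofList L).items = L := by
  show (L.foldl (fun (acc : PySem.Dict κ ν) p => acc.insert p.1 p.2) PySem.Dict.empty).items = L
  rw [PySem.Dict.items_foldl_insert_fresh L Prod.fst Prod.snd PySem.Dict.empty
    (fun a _ => PySem.Dict.contains_empty _) h]
  simp [PySem.Dict.empty]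

-- A's result in closed form
theorem hA_closed (w1 w2 : List (List (String × Int))) :
    diff_wallet w1 w2 =
      (PySem.Set.update (pvKeys w1) (pvKeys w2)).filterMap
        (fun k => if pvG w1 w2 k = 0 then none else some (k, pvG w1 w2 k)) := by
  show (PySem.Dict.items (List.foldl
      (fun wallet_diff currencyId =>
        if (pvW w2).getD currencyId 0 - (pvW w1).getD currencyId 0 = 0 then wallet_diff
        else wallet_diff.insert currencyId ((pvW w2).getD currencyId 0 - (pvW w1).getD currencyId 0))
      PySem.Dict.empty
      (PySem.Set.union (PySem.Set.union PySem.Set.empty (pvW w1).keys) (pvW w2).keys))) = _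
  rw [pvW_keys w1, pvW_keys w2]
  have h1 : PySem.Set.union PySem.Set.empty (pvKeys w1) = pvKeys w1 :=
    PySem.Set.ofList_eq_self_of_nodup _ (PySem.Set.nodup_ofList _)
  rw [h1]
  show (List.foldl
      (fun d k => if pvG w1 w2 k = 0 then d else d.insert k (pvG w1 w2 k))
      PySem.Dict.empty (PySem.Set.update (pvKeys w1) (pvKeys w2))).items = _
  rw [items_foldl_insert_if (pvG w1 w2) (PySem.Set.update (pvKeys w1) (pvKeys w2))
    PySem.Dict.empty (PySem.Set.nodup_update _ _ (PySem.Set.nodup_ofList _))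
    (fun k _ => PySem.Dict.contains_empty k)]
  simp [PySem.Dict.empty]

-- set(xs.map f) for injective f is set(xs) mapped through f
theorem ofList_map_injective {α β : Type} [BEq α] [LawfulBEq α] [BEq β] [LawfulBEq β]
    (f : α → β) (hf : Function.Injective f) (xs : List α) :
    PySem.Set.ofList (xs.map f) = (PySem.Set.ofList xs).map f := by
  induction xs using List.reverseRecOn with
  | nil => rfl
  | append_singleton xs x ih =>
    rw [List.map_append, List.map_singleton, PySem.Set.ofList_append_singleton,
      PySem.Set.ofList_append_singleton, ih]
    by_cases hx : x ∈ PySem.Set.ofList xs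
    · rw [PySem.Set.add_of_mem hx, PySem.Set.add_of_mem (List.mem_map_of_mem hx)]
    · rw [PySem.Set.add_of_not_mem hx, PySem.Set.add_of_not_mem (by
        intro hmem
        obtain ⟨y, hy, hxy⟩ := List.mem_map.mp hmem
        exact hx (hf hxy ▸ hy)), List.map_append, List.map_singleton]

-- a lookup untouched by an insert-fold whose keys avoid it
theorem getD_foldl_insert_acc_not_mem (h : Int → Int) (ks : List Int)
    (d : PySem.Dict Int Int) (k0 : Int) (hk0 : k0 ∉ ks) :
    (ks.foldl (fun n k => n.insert k (n.getD k 0 + h k)) d).getD k0 0 = d.getD k0 0 := by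
  induction ks generalizing d with
  | nil => rfl
  | cons k ks ih =>
    rw [List.foldl_cons, ih _ (fun hm => hk0 (List.mem_cons_of_mem _ hm)),
      PySem.Dict.getD_insert_of_ne _ _ _ (by intro he; exact hk0 (by rw [he]; exact List.mem_cons_self ..))]

-- the signed-accumulation fold over distinct keys adds h k exactly once per key
theorem getD_foldl_insert_acc (h : Int → Int) (ks : List Int) (hnd : ks.Nodup)
    (d : PySem.Dict Int Int) (k0 : Int) :
    (ks.foldl (fun n k => n.insert k (n.getD k 0 + h k)) d).getD k0 0 =
      d.getD k0 0 + if k0 ∈ ks then h k0 else 0 := by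
  induction ks generalizing d with
  | nil => simp
  | cons k ks ih =>
    rw [List.foldl_cons]
    by_cases he : k0 = k
    · subst he
      rw [getD_foldl_insert_acc_not_mem h ks _ k0 (List.nodup_cons.mp hnd).1,
        PySem.Dict.getD_insert_self]
      simp
    · rw [ih hnd.of_cons, PySem.Dict.getD_insert_of_ne _ _ _ he]
      simp [he]

-- B's first loop: the tagged latest-value dict in closed form (items)
theorem hB_latest (w1 w2 : List (List (String × Int))) :
    ([((-1 : Int), w1), ((1 : Int), w2)].foldl
      (fun latest sw =>
        sw.2.foldl (fun latest c => latest.insert (sw.1, pvField c "id") (pvField c "value")) latest)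
      PySem.Dict.empty).items =
      (pvKeys w1).map (fun k => (((-1 : Int), k), (pvW w1).getD k 0)) ++
      (pvKeys w2).map (fun k => (((1 : Int), k), (pvW w2).getD k 0)) := by
  simp only [List.foldl_cons, List.foldl_nil]
  set D : PySem.Dict (Int × Int) Int :=
    (w2.foldl (fun latest c => latest.insert ((1 : Int), pvField c "id") (pvField c "value"))
      (w1.foldl (fun latest c => latest.insert ((-1 : Int), pvField c "id") (pvField c "value"))
        PySem.Dict.empty)) with hD
  -- keys of D
  have hkeys : D.keys =
      PySem.Set.update (PySem.Set.ofList (w1.map (fun c => (((-1 : Int), pvK c) : Int × Int))))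
        (w2.map (fun c => (((1 : Int), pvK c) : Int × Int))) := by
    rw [hD, PySem.Dict.keys_foldl_insert_key w2 (fun c => (((1 : Int), pvField c "id") : Int × Int))
      (fun _ c => pvField c "value"),
      PySem.Dict.keys_foldl_insert_key w1 (fun c => (((-1 : Int), pvField c "id") : Int × Int))
      (fun _ c => pvField c "value")]
    rfl
  have hK1 : PySem.Set.ofList (w1.map (fun c => (((-1 : Int), pvK c) : Int × Int))) =
      (pvKeys w1).map (fun k => (((-1 : Int), k) : Int × Int)) := by
    have h0 := ofList_map_injective (fun k => (((-1 : Int), k) : Int × Int))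
      (fun a b h => (Prod.mk.injEq _ _ _ _ ▸ h).2) (w1.map pvK)
    have hcomp : List.map (fun c => (((-1 : Int), pvK c) : Int × Int)) w1 =
        (w1.map pvK).map (fun k => (((-1 : Int), k) : Int × Int)) := by rw [List.map_map]; rfl
    rw [hcomp]; exact h0
  have hK2 : PySem.Set.ofList (w2.map (fun c => (((1 : Int), pvK c) : Int × Int))) =
      (pvKeys w2).map (fun k => (((1 : Int), k) : Int × Int)) := by
    have h0 := ofList_map_injective (fun k => (((1 : Int), k) : Int × Int))
      (fun a b h => (Prod.mk.injEq _ _ _ _ ▸ h).2) (w2.map pvK)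
    have hcomp : List.map (fun c => (((1 : Int), pvK c) : Int × Int)) w2 =
        (w2.map pvK).map (fun k => (((1 : Int), k) : Int × Int)) := by rw [List.map_map]; rfl
    rw [hcomp]; exact h0
  have hKeq : D.keys =
      (pvKeys w1).map (fun k => (((-1 : Int), k) : Int × Int)) ++
      (pvKeys w2).map (fun k => (((1 : Int), k) : Int × Int)) := by
    rw [hkeys, PySem.Set.update_eq_append_filter, hK1]
    congr 1
    rw [hK2]
    apply List.filter_eq_self.mpr
    intro p hp
    obtain ⟨k, _, rfl⟩ := List.mem_map.mp hp
    simp only [Bool.not_eq_eq_eq_not, Bool.not_true]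
    rw [Bool.eq_false_iff]
    intro hc
    have hmem := (PySem.Set.contains_iff _ _).mp hc
    obtain ⟨k', _, hkk⟩ := List.mem_map.mp hmem
    have h1 := congrArg Prod.fst hkk
    norm_num at h1
  have hnd : D.keys.Nodup := by
    rw [hD]
    exact PySem.Dict.nodup_keys_foldl_insert_key _ _ _ _
      (PySem.Dict.nodup_keys_foldl_insert_key _ _ _ _ PySem.Dict.nodup_keys_empty)
  -- values of D
  have hval1 : ∀ k ∈ pvKeys w1, D.getD (((-1 : Int), k)) 0 = (pvW w1).getD k 0 := by
    intro k hk
    rw [hD, getD_foldl_insert_keyfun (fun c => (((1 : Int), pvField c "id") : Int × Int))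
      (fun c => pvField c "value")]
    have hf2 : w2.filter (fun c => ((((1 : Int), pvField c "id") : Int × Int) == ((-1 : Int), k))) = [] := by
      apply List.filter_eq_nil_iff.mpr
      intro c _
      simp
    rw [hf2, List.foldl_nil,
      getD_foldl_insert_keyfun (fun c => (((-1 : Int), pvField c "id") : Int × Int))
      (fun c => pvField c "value"), foldl_const_getLastD, pvW_getD]
    have hfc : w1.filter (fun c => ((((-1 : Int), pvField c "id") : Int × Int) == ((-1 : Int), k))) =
        w1.filter (fun c => pvK c == k) := by
      apply List.filter_congr
      intro c _
      simp [pvK]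
    rw [hfc]
    rfl
  have hval2 : ∀ k ∈ pvKeys w2, D.getD (((1 : Int), k)) 0 = (pvW w2).getD k 0 := by
    intro k hk
    rw [hD, getD_foldl_insert_keyfun (fun c => (((1 : Int), pvField c "id") : Int × Int))
      (fun c => pvField c "value")]
    have hfc : w2.filter (fun c => ((((1 : Int), pvField c "id") : Int × Int) == ((1 : Int), k))) =
        w2.filter (fun c => pvK c == k) := by
      apply List.filter_congr
      intro c _
      simp [pvK]
    rw [hfc, foldl_const_getLastD, pvW_getD]
    have hne := (mem_pvKeys_iff w2 k).mp hk
    rcases hlast : (w2.filter (fun c => pvK c == k)).getLast? with _ | c0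
    · exact absurd (List.getLast?_eq_none_iff.mp hlast) hne
    · rw [List.getLastD_eq_getLast?, List.getLast?_map, hlast,
        List.getLastD_eq_getLast?, List.getLast?_map, hlast]
      rfl
  -- assemble the items
  rw [PySem.Dict.items_eq_map_keys D hnd 0, hKeq, List.map_append, List.map_map, List.map_map]
  congr 1
  · exact List.map_congr_left (fun k hk => by simp only [Function.comp]; rw [hval1 k hk])
  · exact List.map_congr_left (fun k hk => by simp only [Function.comp]; rw [hval2 k hk])

-- B's result in the same closed form
theorem hB_closed (w1 w2 : List (List (String × Int))) :
    diff_wallet_alt w1 w2 =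
      (PySem.Set.update (pvKeys w1) (pvKeys w2)).filterMap
        (fun k => if pvG w1 w2 k = 0 then none else some (k, pvG w1 w2 k)) := by
  show (PySem.Dict.ofList
      ((((([(((-1 : Int)), w1), (((1 : Int)), w2)].foldl
          (fun latest sw =>
            sw.2.foldl (fun latest c => latest.insert (sw.1, pvField c "id") (pvField c "value")) latest)
          PySem.Dict.empty).items).foldl
        (fun net p => net.insert p.1.2 (net.getD p.1.2 0 + p.1.1 * p.2)) PySem.Dict.empty).items).filter
        (fun p => p.2 != 0))).items = _
  rw [hB_latest]
  -- the accumulation fold over the two tagged segments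
  rw [List.foldl_append, List.foldl_map, List.foldl_map]
  simp only []
  -- keys of the net dict
  have hkeysN : ((pvKeys w2).foldl
      (fun net k => net.insert k (net.getD k 0 + 1 * (pvW w2).getD k 0))
      ((pvKeys w1).foldl (fun net k => net.insert k (net.getD k 0 + (-1) * (pvW w1).getD k 0))
        PySem.Dict.empty)).keys = PySem.Set.update (pvKeys w1) (pvKeys w2) := by
    rw [PySem.Dict.keys_foldl_insert (pvKeys w2) (fun n k => n.getD k 0 + 1 * (pvW w2).getD k 0),
      PySem.Dict.keys_foldl_insert (pvKeys w1) (fun n k => n.getD k 0 + (-1) * (pvW w1).getD k 0)]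
    show PySem.Set.update (PySem.Set.update [] (pvKeys w1)) (pvKeys w2) = _
    rw [PySem.Set.update_nil_left]
    congr 1
    exact PySem.Set.ofList_eq_self_of_nodup _ (by unfold pvKeys; exact PySem.Set.nodup_ofList _)
  have hgetD : ∀ k0, ((pvKeys w2).foldl
      (fun net k => net.insert k (net.getD k 0 + 1 * (pvW w2).getD k 0))
      ((pvKeys w1).foldl (fun net k => net.insert k (net.getD k 0 + (-1) * (pvW w1).getD k 0))
        PySem.Dict.empty)).getD k0 0 = pvG w1 w2 k0 := by
    intro k0
    rw [getD_foldl_insert_acc (fun k => 1 * (pvW w2).getD k 0) (pvKeys w2)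
        (by unfold pvKeys; exact PySem.Set.nodup_ofList _),
      getD_foldl_insert_acc (fun k => (-1) * (pvW w1).getD k 0) (pvKeys w1)
        (by unfold pvKeys; exact PySem.Set.nodup_ofList _),
      PySem.Dict.getD_empty]
    unfold pvG
    by_cases h1 : k0 ∈ pvKeys w1 <;> by_cases h2 : k0 ∈ pvKeys w2 <;>
      simp [h1, h2, pvW_getD_of_not_mem, sub_eq_neg_add]
  have hndN : ((pvKeys w2).foldl
      (fun net k => net.insert k (net.getD k 0 + 1 * (pvW w2).getD k 0))
      ((pvKeys w1).foldl (fun net k => net.insert k (net.getD k 0 + (-1) * (pvW w1).getD k 0))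
        PySem.Dict.empty)).keys.Nodup := by
    rw [hkeysN]; exact PySem.Set.nodup_update _ _ (PySem.Set.nodup_ofList _)
  rw [PySem.Dict.items_eq_map_keys _ hndN 0, hkeysN,
    List.map_congr_left (fun k _ => by rw [hgetD k] :
      ∀ k ∈ PySem.Set.update (pvKeys w1) (pvKeys w2), _ = (k, pvG w1 w2 k)),
    filter_map_pair (pvG w1 w2)]
  apply items_ofList_of_nodup_keys
  rw [map_fst_filterMap_if]
  exact (PySem.Set.nodup_update _ _ (PySem.Set.nodup_ofList _)).filter _

-- ===== VERDICT (by name: the statement is the Claim_ definition above) =====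
theorem diff_wallet_spec : Claim_equal_diff_wallet := by
  intro wallet1 wallet2 _ _
  unfold Spec_diff_wallet
  rw [hA_closed, hB_closed]
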